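-- pv_equiv track=rewrite | github.com/pig0726/LeetCode | contest/LeetCode_Weekly_Contest_206/RabbitLee/Check_If_String_Is_Transformable_With_Substring_Sort_Operations.py | isTransformable
-- ===== SOURCE A (Python) =====
-- def isTransformable(s: str, t: str) -> bool:
--     n = len(s)
--     posi = [n] * 10
--     for i, c1 in enumerate(s):
--         v = ord(c1) - ord('0')
--         if posi[v] == n:
--             posi[v] = i
--     for c2 in t:
--         v = ord(c2) - ord('0')
--         if posi[v] == n:
--             return False
--         for i in range(v):
--             if posi[i] < posi[v]:
--                 return False
--         posi[v] += 1
--         while posi[v] < n and s[posi[v]] != c2: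
--             posi[v] += 1
--     return True
-- ===== SOURCE B (Python) =====
-- def isTransformable(s, t):
--     # For each digit d, record for each of its occurrences in s a snapshot of the
--     # counts of the smaller digits seen so far; positions are never stored.
--     snaps = [[] for _ in range(10)]
--     cnt = [0] * 10
--     for ch in s:
--         d = ord(ch) - 48
--         snaps[d].append(cnt[:d])
--         cnt[d] += 1
--     seen = [0] * 10
--     for ch in t:
--         v = ord(ch) - 48
--         j = seen[v]
--         if j == len(snaps[v]):
--             return False
--         smaller = snaps[v][j]
--         if any(smaller[i] > seen[i] for i in range(v)):
--             return False
--         seen[v] += 1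
--     return True
-- ===== Notes on version B (the rewrite author's own statement) =====
-- stated objective: alternative
-- what changed: B never stores or compares positions: for every occurrence of a digit in s it records a snapshot of how many copies of each smaller digit precede it, and each character of t is validated by comparing those recorded counts with a consumed-count array, replacing A's position pointers and while-loop rescans of s.
-- outside the precondition, e.g. on isTransformable('144', '**'): A returns False, B returns True
import Mathlib
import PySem

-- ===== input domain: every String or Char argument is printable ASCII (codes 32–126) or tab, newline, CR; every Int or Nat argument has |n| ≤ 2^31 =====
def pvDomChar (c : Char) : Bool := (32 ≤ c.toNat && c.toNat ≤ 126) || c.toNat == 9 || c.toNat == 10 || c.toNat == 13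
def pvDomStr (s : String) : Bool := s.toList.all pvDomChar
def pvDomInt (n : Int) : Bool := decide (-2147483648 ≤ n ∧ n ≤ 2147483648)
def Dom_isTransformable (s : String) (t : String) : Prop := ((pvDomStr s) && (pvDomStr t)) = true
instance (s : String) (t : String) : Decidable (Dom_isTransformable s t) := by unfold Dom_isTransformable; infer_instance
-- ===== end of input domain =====

-- B replaces A's lazy per-digit position pointer (with rescanning while-loops) by recorded
-- smaller-digit count snapshots per occurrence, compared against consumed counts (alternative, same cost).


-- v = ord(c) - ord('0')
def pvDv (c : Char) : Int := (c.toNat : Int) - 48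

-- ===== PORT A =====
-- the while loop: posi[v] += 1; while posi[v] < n and s[posi[v]] != c2: posi[v] += 1
-- (called with the already-incremented index j)
def pvScanA (ls : List Char) (n : Int) (c : Char) (j : Int) : Int :=
  if h : j < n ∧ PySem.List.pyGetD ls j ' ' ≠ c then pvScanA ls n c (j + 1) else j
termination_by (n - j).toNat
decreasing_by omega

-- body of the first loop: if posi[v] == n: posi[v] = i
def pvStepA1 (n : Int) (posi : List Int) (ic : Int × Char) : List Int :=
  let v := pvDv ic.2
  if PySem.List.pyGetD posi v 0 = n then PySem.List.pySetD posi v ic.1 else posi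

def pvInitA (ls : List Char) (n : Int) : List Int :=
  (PySem.List.enumerate ls 0).foldl (pvStepA1 n) (List.replicate 10 n)

-- second loop of A (early return = returning false)
def pvLoopA (ls : List Char) (n : Int) : List Char → List Int → Bool
  | [], _ => true
  | c :: rest, posi =>
    let v := pvDv c
    if PySem.List.pyGetD posi v 0 = n then false
    else if (PySem.List.pyRange 0 v 1).any
        (fun i => decide (PySem.List.pyGetD posi i 0 < PySem.List.pyGetD posi v 0)) then false
    else pvLoopA ls n rest
      (PySem.List.pySetD posi v (pvScanA ls n c (PySem.List.pyGetD posi v 0 + 1)))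

def isTransformable (s : String) (t : String) : Bool :=
  let ls := s.toList
  let n : Int := ls.length
  pvLoopA ls n t.toList (pvInitA ls n)

-- ===== PORT B =====
-- first loop: snaps[d].append(cnt[:d]); cnt[d] += 1
def pvStepB (st : List (List (List Int)) × List Int) (c : Char) :
    List (List (List Int)) × List Int :=
  let d := pvDv c
  (PySem.List.pySetD st.1 d
      (PySem.List.pyGetD st.1 d [] ++ [PySem.List.slice st.2 none (some d)]),
   PySem.List.pySetD st.2 d (PySem.List.pyGetD st.2 d 0 + 1))

-- second loop over t, state = consumed counts 'seen'
def pvLoopB : List Char → List (List (List Int)) → List Int → Bool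
  | [], _, _ => true
  | c :: rest, snaps, seen =>
    let v := pvDv c
    let j := PySem.List.pyGetD seen v 0
    if j = ((PySem.List.pyGetD snaps v []).length : Int) then false
    else
      let smaller := PySem.List.pyGetD (PySem.List.pyGetD snaps v []) j []
      if (PySem.List.pyRange 0 v 1).any (fun i =>
            decide (PySem.List.pyGetD seen i 0 < PySem.List.pyGetD smaller i 0)) then false
      else pvLoopB rest snaps (PySem.List.pySetD seen v (j + 1))

def isTransformable_alt (s : String) (t : String) : Bool :=
  let st := s.toList.foldl pvStepB (List.replicate 10 ([] : List (List Int)), List.replicate 10 (0 : Int))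
  pvLoopB t.toList st.1 (List.replicate 10 0)

-- ===== PRECONDITION & SPEC =====
-- Pre_ restricts both strings to decimal digits '0'..'9': on any other character A raises
-- IndexError (posi[v] with v ≥ 10 or v < -10), except for characters '&'..'/' whose negative
-- v wraps around to another digit's slot, an accident of Python list indexing on which A's
-- returned value is not the function's intent (e.g. A('144','**') = False while B = True).
def Pre_isTransformable (s : String) (t : String) : Prop :=
  (s.toList.all (fun c => 48 ≤ c.toNat && c.toNat ≤ 57)
    && t.toList.all (fun c => 48 ≤ c.toNat && c.toNat ≤ 57)) = true
instance (s : String) (t : String) : Decidable (Pre_isTransformable s t) := by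
  unfold Pre_isTransformable; infer_instance

def pvWitness_isTransformable : String × String := ("84532", "34852")

def Spec_isTransformable (s : String) (t : String) (out : Bool) : Prop := out = isTransformable_alt s t
instance (s : String) (t : String) (out : Bool) : Decidable (Spec_isTransformable s t out) := by
  unfold Spec_isTransformable; infer_instance

-- ===== CLAIM (what is proved, stated in full; the proofs are below) =====
def Claim_equal_isTransformable : Prop := ∀ (s : String) (t : String), Dom_isTransformable s t → Pre_isTransformable s t → Spec_isTransformable s t (isTransformable s t)

-- ===== LEMMAS AND PROOFS =====

-- the (increasing) list of positions of digit class v in ls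
def pvOcc (ls : List Char) (v : Int) : List Int :=
  (PySem.List.pyRange 0 (ls.length : Int) 1).filter
    (fun j => decide (pvDv (PySem.List.pyGetD ls j ' ') = v))

-- number of occurrences of digit i strictly before position p
def pvCntLt (ls : List Char) (i : Nat) (p : Int) : Int :=
  (((pvOcc ls ((i : Nat) : Int)).filter (fun y => decide (y < p))).length : Int)

-- B's recorded snapshot for an occurrence of digit v at position p
def pvSnap (ls : List Char) (v : Nat) (p : Int) : List Int :=
  (List.range v).map (fun i => pvCntLt ls i p)

lemma pvOcc_pairwise (ls : List Char) (v : Int) : (pvOcc ls v).Pairwise (· < ·) :=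
  List.Pairwise.filter _ (PySem.List.pairwise_lt_pyRange_one 0 _)

lemma pvOcc_mem_iff {ls : List Char} {v j : Int} :
    j ∈ pvOcc ls v ↔ (0 ≤ j ∧ j < (ls.length : Int)) ∧ pvDv (PySem.List.pyGetD ls j ' ') = v := by
  unfold pvOcc
  simp [List.mem_filter, PySem.List.mem_pyRange_one, and_assoc]

lemma pvOcc_nil (v : Int) : pvOcc [] v = [] := by
  unfold pvOcc
  rw [show ((List.length ([] : List Char) : Nat) : Int) = 0 by simp,
      PySem.List.pyRange_one_eq_nil le_rfl]
  rfl

lemma pvOcc_append (p : List Char) (c : Char) (v : Int) :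
    pvOcc (p ++ [c]) v = pvOcc p v ++ (if pvDv c = v then [(p.length : Int)] else []) := by
  unfold pvOcc
  have hlen : (((p ++ [c]).length : Nat) : Int) = (p.length : Int) + 1 := by
    simp
  rw [hlen, PySem.List.pyRange_one_succ_right (by positivity), List.filter_append]
  congr 1
  · apply List.filter_congr
    intro j hj
    obtain ⟨h0, h1⟩ := PySem.List.mem_pyRange_one.mp hj
    have e1 : PySem.List.pyGetD (p ++ [c]) j ' ' = PySem.List.pyGetD p j ' ' := by
      rw [PySem.List.pyGetD_eq_getElem (p ++ [c]) ' ' h0 (by simp; omega),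
          PySem.List.pyGetD_eq_getElem p ' ' h0 (by omega)]
      exact List.getElem_append_left (by omega)
    rw [e1]
  · have e2 : PySem.List.pyGetD (p ++ [c]) ((p.length : Nat) : Int) ' ' = c := by
      rw [PySem.List.pyGetD_eq_getElem (p ++ [c]) ' ' (by positivity) (by simp)]
      simp only [Int.toNat_natCast]
      exact List.getElem_concat_length rfl (by simp)
    simp only [List.filter_cons, List.filter_nil, e2]
    split <;> simp_all

lemma pvOccElt_lt {p : List Char} {v j : Int} (h : j ∈ pvOcc p v) : j < (p.length : Int) :=
  (pvOcc_mem_iff.mp h).1.2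

-- any over the same range with pointwise equal predicates
lemma pvAnyCongr {l : List Int} {f g : Int → Bool} (h : ∀ a ∈ l, f a = g a) :
    l.any f = l.any g := by
  induction l with
  | nil => rfl
  | cons a l ih =>
    simp only [List.any_cons, h a (List.mem_cons_self), ih (fun b hb => h b (List.mem_cons_of_mem a hb))]

lemma pvHeadDFilterSelf {l : List Int} (h : l.Pairwise (· < ·)) {j : Int} (hj : j ∈ l) (d : Int) :
    (l.filter (fun y => decide (j ≤ y))).headD d = j := by
  induction l with
  | nil => cases hj
  | cons a l ih =>
    rcases List.mem_cons.mp hj with rfl | hj'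
    · simp
    · have ha : a < j := (List.pairwise_cons.mp h).1 j hj'
      have : (decide (j ≤ a)) = false := by simp; omega
      simp only [List.filter_cons, this]
      exact ih (List.pairwise_cons.mp h).2 hj'

lemma pvFilterDrop {l : List Int} (h : l.Pairwise (· < ·)) {k : Nat} (hk : k < l.length) :
    l.filter (fun y => decide (l[k] + 1 ≤ y)) = l.drop (k + 1) := by
  induction l generalizing k with
  | nil => cases hk
  | cons a l ih =>
    obtain ⟨ha, hp⟩ := List.pairwise_cons.mp h
    cases k with
    | zero =>
      simp only [List.getElem_cons_zero, List.filter_cons, List.drop_succ_cons, List.drop_zero]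
      rw [if_neg (by simp)]
      exact List.filter_eq_self.mpr (fun y hy => by simpa using (ha y hy))
    | succ k =>
      have hk' : k < l.length := by simpa using hk
      simp only [List.getElem_cons_succ, List.filter_cons, List.drop_succ_cons]
      have hla := ha l[k] (l.getElem_mem hk')
      rw [if_neg (by simp; omega)]
      exact ih hp hk'

-- the while scan finds the first occurrence ≥ j (or n)
lemma pvScanAux (ls : List Char) (c : Char) (m : Nat) :
    ∀ j : Int, 0 ≤ j → j ≤ (ls.length : Int) → ((ls.length : Int) - j).toNat = m →
    pvScanA ls (ls.length : Int) c j
      = ((pvOcc ls (pvDv c)).filter (fun y => decide (j ≤ y))).headD (ls.length : Int) := by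
  induction m using Nat.strong_induction_on with
  | _ m ih =>
    intro j h0 h1 hm
    rw [pvScanA]
    split
    · next h =>
      obtain ⟨hjn, hne⟩ := h
      have hnotin : j ∉ pvOcc ls (pvDv c) := by
        intro hmem
        obtain ⟨-, he⟩ := pvOcc_mem_iff.mp hmem
        have : (PySem.List.pyGetD ls j ' ').toNat = c.toNat := by unfold pvDv at he; omega
        exact hne (Char.ext (UInt32.toNat_inj.mp this))
      have hf : (pvOcc ls (pvDv c)).filter (fun y => decide (j ≤ y))
          = (pvOcc ls (pvDv c)).filter (fun y => decide (j + 1 ≤ y)) := by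
        apply List.filter_congr
        intro y hy
        have : y ≠ j := fun hyj => hnotin (hyj ▸ hy)
        simp only [decide_eq_decide]; omega
      rw [hf]
      exact ih _ (by omega) (j + 1) (by omega) (by omega) rfl
    · next h =>
      rcases (by omega : j = (ls.length : Int) ∨ j < (ls.length : Int)) with hj | hj
      · have hf : (pvOcc ls (pvDv c)).filter (fun y => decide (j ≤ y)) = [] := by
          apply List.filter_eq_nil_iff.mpr
          intro y hy
          have := (pvOcc_mem_iff.mp hy).1.2
          simp; omega
        rw [hf]; simpa using hj
      · have hceq : PySem.List.pyGetD ls j ' ' = c := by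
          by_contra hne; exact h ⟨hj, hne⟩
        have hin : j ∈ pvOcc ls (pvDv c) := pvOcc_mem_iff.mpr ⟨⟨h0, hj⟩, by rw [hceq]⟩
        exact (pvHeadDFilterSelf (pvOcc_pairwise ls (pvDv c)) hin _).symm

lemma pvScanSpec (ls : List Char) (c : Char) (j : Int) (h0 : 0 ≤ j)
    (h1 : j ≤ (ls.length : Int)) :
    pvScanA ls (ls.length : Int) c j
      = ((pvOcc ls (pvDv c)).filter (fun y => decide (j ≤ y))).headD (ls.length : Int) :=
  pvScanAux ls c _ j h0 h1 rfl

lemma pvFoldA_len (n : Int) (l : List (Int × Char)) (posi : List Int) :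
    (l.foldl (pvStepA1 n) posi).length = posi.length := by
  induction l generalizing posi with
  | nil => rfl
  | cons a l ih =>
    rw [List.foldl_cons, ih]
    unfold pvStepA1
    dsimp only
    split
    · exact PySem.List.length_pySetD ..
    · rfl

lemma pvInitA_len (ls : List Char) (n : Int) : (pvInitA ls n).length = 10 := by
  unfold pvInitA; rw [pvFoldA_len]; rfl

-- one step of A's first loop, at an in-range digit index
lemma pvEnum_concat (p : List Char) (c : Char) :
    PySem.List.enumerate (p ++ [c]) 0 = PySem.List.enumerate p 0 ++ [((p.length : Int), c)] := by
  rw [PySem.List.enumerate_append]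
  simp [PySem.List.enumerate]

lemma pvHeadD_empty_iff {p : List Char} {v : Int} {n : Int} (hn : (p.length : Int) ≤ n) :
    (pvOcc p v).headD n = n ↔ pvOcc p v = [] := by
  cases hocc : pvOcc p v with
  | nil => simp
  | cons x xs =>
    have : x < (p.length : Int) := pvOccElt_lt (hocc ▸ List.mem_cons_self)
    simp; omega

lemma pvInitA_spec (p : List Char) (hp : ∀ c ∈ p, 48 ≤ c.toNat ∧ c.toNat ≤ 57)
    (n : Int) (hn : (p.length : Int) ≤ n) :
    ∀ v : Nat, v < 10 → (pvInitA p n).getD v 0 = (pvOcc p v).headD n := by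
  induction p using List.reverseRecOn with
  | nil =>
    intro v hv
    rw [pvOcc_nil]
    interval_cases v <;> rfl
  | append_singleton q c ih =>
    intro v hv
    have hq : ∀ x ∈ q, 48 ≤ x.toNat ∧ x.toNat ≤ 57 := fun x hx => hp x (List.mem_append_left _ hx)
    have hc : 48 ≤ c.toNat ∧ c.toNat ≤ 57 := hp c (List.mem_append_right _ List.mem_cons_self)
    have hqn : (q.length : Int) ≤ n := by simp at hn; omega
    have ihq := ih hq hqn
    have hstep : pvInitA (q ++ [c]) n = pvStepA1 n (pvInitA q n) ((q.length : Int), c) := by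
      unfold pvInitA
      rw [pvEnum_concat, List.foldl_append, List.foldl_cons, List.foldl_nil]
    rw [hstep, pvOcc_append]
    set w : Nat := c.toNat - 48 with hw
    have hwv : pvDv c = ((w : Nat) : Int) := by unfold pvDv; omega
    have hw10 : w < 10 := by omega
    have hlenA : (pvInitA q n).length = 10 := pvInitA_len q n
    unfold pvStepA1
    dsimp only
    rw [hwv, PySem.List.pyGetD_natCast, PySem.List.pySetD_natCast]
    by_cases hemp : (pvInitA q n).getD w 0 = n
    · rw [if_pos hemp]
      have hocc : pvOcc q w = [] := (pvHeadD_empty_iff hqn).mp (by rw [← ihq w hw10]; exact hemp)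
      by_cases hvw : v = w
      · subst hvw
        rw [List.getD_eq_getElem?_getD, List.getElem?_set_self (by omega)]
        rw [if_pos rfl, hocc]
        simp
      · have hne : ¬ (w : Nat) = v := fun h => hvw (by omega)
        rw [List.getD_eq_getElem?_getD, List.getElem?_set_ne (by omega),
            ← List.getD_eq_getElem?_getD, ihq v hv]
        rw [if_neg (show ¬((w : Nat) : Int) = ((v : Nat) : Int) from by exact_mod_cast hne)]
        simp
    · rw [if_neg hemp]
      have hocc : pvOcc q w ≠ [] := by
        intro h0
        exact hemp (by rw [ihq w hw10, h0]; rfl)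
      by_cases hvw : v = w
      · subst hvw
        rw [ihq w hw10, if_pos rfl]
        cases hocc2 : pvOcc q (w : Int) with
        | nil => exact absurd hocc2 hocc
        | cons x xs => simp
      · have hne : ¬ (w : Nat) = v := fun h => hvw (by omega)
        rw [ihq v hv]
        rw [if_neg (show ¬((w : Nat) : Int) = ((v : Nat) : Int) from by exact_mod_cast hne)]
        simp

-- ----- B-side characterization -----

-- counts of occurrences strictly before a position are unaffected by appending later chars
lemma pvCntLt_stable (q : List Char) (c : Char) (i : Nat) {p : Int}
    (hp : p ≤ (q.length : Int)) : pvCntLt (q ++ [c]) i p = pvCntLt q i p := by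
  unfold pvCntLt
  rw [pvOcc_append, List.filter_append]
  have : ((if pvDv c = ((i : Nat) : Int) then [((q.length : Nat) : Int)] else []).filter
      (fun y => decide (y < p))) = [] := by
    split
    · simp only [List.filter_cons, List.filter_nil]
      rw [if_neg (by simp; omega)]
    · rfl
  rw [this, List.append_nil]

lemma pvSnap_stable (q : List Char) (c : Char) (v : Nat) {p : Int}
    (hp : p ≤ (q.length : Int)) : pvSnap (q ++ [c]) v p = pvSnap q v p :=
  List.map_congr_left (fun i _ => pvCntLt_stable q c i hp)

lemma pvCntLt_all (q : List Char) (i : Nat) :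
    pvCntLt q i ((q.length : Nat) : Int) = ((pvOcc q ((i : Nat) : Int)).length : Int) := by
  unfold pvCntLt
  rw [List.filter_eq_self.mpr (fun y hy => by
    have := pvOccElt_lt hy; simpa using this)]

lemma pvFoldB_len1 (l : List Char) (st : List (List (List Int)) × List Int) :
    (l.foldl pvStepB st).1.length = st.1.length := by
  induction l generalizing st with
  | nil => rfl
  | cons a l ih =>
    rw [List.foldl_cons, ih]
    exact PySem.List.length_pySetD ..

-- the first fold of B: counts and snapshot tables
lemma pvFoldB_spec (q : List Char) (hq : ∀ c ∈ q, 48 ≤ c.toNat ∧ c.toNat ≤ 57) :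
    (q.foldl pvStepB (List.replicate 10 ([] : List (List Int)), List.replicate 10 (0 : Int))).2
      = (List.range 10).map (fun i => ((pvOcc q ((i : Nat) : Int)).length : Int))
    ∧ ∀ v : Nat, v < 10 →
      (q.foldl pvStepB (List.replicate 10 ([] : List (List Int)), List.replicate 10 (0 : Int))).1.getD v []
        = (pvOcc q ((v : Nat) : Int)).map (pvSnap q v) := by
  induction q using List.reverseRecOn with
  | nil =>
    constructor
    · decide
    · intro v hv
      rw [pvOcc_nil]
      interval_cases v <;> rfl
  | append_singleton q c ih =>
    have hq' : ∀ x ∈ q, 48 ≤ x.toNat ∧ x.toNat ≤ 57 := fun x hx => hq x (List.mem_append_left _ hx)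
    have hc : 48 ≤ c.toNat ∧ c.toNat ≤ 57 := hq c (List.mem_append_right _ List.mem_cons_self)
    obtain ⟨ihc, ihs⟩ := ih hq'
    set w : Nat := c.toNat - 48 with hw
    have hwv : pvDv c = ((w : Nat) : Int) := by unfold pvDv; omega
    have hw10 : w < 10 := by omega
    set st := q.foldl pvStepB (List.replicate 10 ([] : List (List Int)), List.replicate 10 (0 : Int)) with hst
    have hstep : (q ++ [c]).foldl pvStepB (List.replicate 10 ([] : List (List Int)), List.replicate 10 (0 : Int))
        = pvStepB st c := by rw [List.foldl_append, List.foldl_cons, List.foldl_nil]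
    have hlen1 : st.1.length = 10 := by rw [hst, pvFoldB_len1]; rfl
    have hcnt : st.2 = (List.range 10).map (fun i => ((pvOcc q ((i : Nat) : Int)).length : Int)) := ihc
    -- the snapshot appended at this step
    have hslice : PySem.List.slice st.2 none (some ((w : Nat) : Int)) = pvSnap (q ++ [c]) w ((q.length : Nat) : Int) := by
      rw [PySem.List.slice_to_natCast, hcnt, ← List.map_take, List.take_range]
      unfold pvSnap
      rw [show min w 10 = w by omega]
      apply List.map_congr_left
      intro i hi
      rw [pvCntLt_stable q c i le_rfl, pvCntLt_all]
    constructor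
    · -- counts
      rw [hstep]
      unfold pvStepB
      dsimp only
      rw [hwv, PySem.List.pyGetD_natCast, PySem.List.pySetD_natCast, hcnt]
      apply List.ext_getElem
      · simp
      · intro i h1 h2
        simp only [List.length_set, List.length_map, List.length_range] at h1
        have hgd : ((List.range 10).map (fun i => ((pvOcc q ((i : Nat) : Int)).length : Int))).getD w 0
            = ((pvOcc q ((w : Nat) : Int)).length : Int) := by
          rw [List.getD_eq_getElem?_getD, List.getElem?_map]
          simp [hw10]
        rw [List.getElem_set]
        simp only [hgd, List.getElem_map, List.getElem_range]
        by_cases hiw : w = i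
        · subst hiw
          rw [if_pos rfl, pvOcc_append, hwv, if_pos rfl]
          simp
        · rw [if_neg hiw, pvOcc_append, hwv,
              if_neg (show ¬ ((w : Nat) : Int) = ((i : Nat) : Int) from by exact_mod_cast hiw)]
          simp
    · -- snapshots
      intro v hv
      rw [hstep]
      unfold pvStepB
      dsimp only
      rw [hwv, PySem.List.pyGetD_natCast, PySem.List.pySetD_natCast]
      have hmapstable : (pvOcc q ((v : Nat) : Int)).map (pvSnap q v)
          = (pvOcc q ((v : Nat) : Int)).map (pvSnap (q ++ [c]) v) := by
        apply List.map_congr_left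
        intro p hp
        exact (pvSnap_stable q c v (le_of_lt (by exact_mod_cast pvOccElt_lt hp))).symm
      by_cases hvw : v = w
      · subst hvw
        rw [List.getD_eq_getElem?_getD, List.getElem?_set_self (by omega)]
        rw [pvOcc_append, hwv, if_pos rfl, List.map_append, Option.getD_some,
            ihs w hw10, hslice, hmapstable]
        simp [pvSnap]
      · have hne : ¬ (w : Nat) = v := fun h => hvw (by omega)
        rw [List.getD_eq_getElem?_getD, List.getElem?_set_ne (by omega),
            ← List.getD_eq_getElem?_getD, ihs v hv,
            pvOcc_append, hwv,
            if_neg (show ¬ ((w : Nat) : Int) = ((v : Nat) : Int) from by exact_mod_cast hne),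
            List.append_nil, hmapstable]

-- key comparison: first unconsumed position < p  ↔  count of positions < p exceeds consumed
lemma pvHeadLt {l : List Int} (h : l.Pairwise (· < ·)) (n p : Int)
    (hn : ∀ x ∈ l, x < n) (hp : p ≤ n) :
    ∀ k : Nat, ((l.drop k).headD n < p
      ↔ (k : Int) < ((l.filter (fun y => decide (y < p))).length : Int)) := by
  induction l with
  | nil =>
    intro k
    simp only [List.drop_nil, List.headD_nil, List.filter_nil, List.length_nil]
    constructor
    · intro hc; omega
    · intro hc; exact absurd hc (by simp)
  | cons a l ih =>
    obtain ⟨ha, hpw⟩ := List.pairwise_cons.mp h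
    have hn' : ∀ x ∈ l, x < n := fun x hx => hn x (List.mem_cons_of_mem a hx)
    intro k
    cases k with
    | zero =>
      simp only [List.drop_zero, List.headD_cons, Nat.cast_zero, List.filter_cons]
      by_cases hap : a < p
      · rw [if_pos (by simpa using hap)]
        simp [hap]
      · rw [if_neg (by simpa using hap)]
        have : l.filter (fun y => decide (y < p)) = [] :=
          List.filter_eq_nil_iff.mpr (fun y hy => by have := ha y hy; simp; omega)
        rw [this]
        simp [hap]
    | succ k =>
      simp only [List.drop_succ_cons, List.filter_cons]
      by_cases hap : a < p
      · rw [if_pos (by simpa using hap)]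
        rw [ih hpw hn' k]
        simp only [List.length_cons]
        constructor <;> intro hc <;> [push_cast; push_cast at hc] <;> omega
      · rw [if_neg (by simpa using hap)]
        have hfl : l.filter (fun y => decide (y < p)) = [] :=
          List.filter_eq_nil_iff.mpr (fun y hy => by have := ha y hy; simp; omega)
        rw [hfl]
        simp only [List.length_nil, Nat.cast_zero]
        constructor
        · intro hc
          exfalso
          cases hd : l.drop k with
          | nil => rw [hd] at hc; simp at hc; omega
          | cons x xs =>
            have hx : x ∈ l := by
              have : x ∈ l.drop k := hd ▸ List.mem_cons_self
              exact List.mem_of_mem_drop this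
            have := ha x hx
            rw [hd] at hc
            simp at hc
            omega
        · intro hc; exfalso; push_cast at hc; omega

-- the two second loops agree under the pointer/counter invariant
lemma pvLoopEq (ls : List Char) (tl : List Char) (htl : ∀ c ∈ tl, 48 ≤ c.toNat ∧ c.toNat ≤ 57)
    (posi seen : List Int) (snaps : List (List (List Int)))
    (hlenA : posi.length = 10) (hlenS : seen.length = 10)
    (hsnaps : ∀ v : Nat, v < 10 → snaps.getD v [] = (pvOcc ls ((v : Nat) : Int)).map (pvSnap ls v))
    (hinv : ∀ v : Nat, v < 10 → ∃ k : Nat, seen.getD v 0 = (k : Int) ∧ k ≤ (pvOcc ls ((v : Nat) : Int)).length ∧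
        posi.getD v 0 = ((pvOcc ls ((v : Nat) : Int)).drop k).headD (ls.length : Int)) :
    pvLoopA ls (ls.length : Int) tl posi = pvLoopB tl snaps seen := by
  induction tl generalizing posi seen with
  | nil => rfl
  | cons c rest ih =>
    have hc := htl c List.mem_cons_self
    have hrest : ∀ x ∈ rest, 48 ≤ x.toNat ∧ x.toNat ≤ 57 :=
      fun x hx => htl x (List.mem_cons_of_mem c hx)
    set vn : Nat := c.toNat - 48 with hvn
    have hwv : pvDv c = ((vn : Nat) : Int) := by unfold pvDv; omega
    have hv10 : vn < 10 := by omega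
    obtain ⟨k, hk, hk2, hk3⟩ := hinv vn hv10
    set occ := pvOcc ls ((vn : Nat) : Int) with hocc
    rw [pvLoopA, pvLoopB]
    dsimp only
    rw [hwv, PySem.List.pyGetD_natCast posi, PySem.List.pyGetD_natCast seen,
        PySem.List.pyGetD_natCast snaps, hsnaps vn hv10, hk, List.length_map]
    by_cases hend : k = occ.length
    · rw [if_pos (by rw [hk3, List.drop_eq_nil_of_le (by omega)]; rfl),
          if_pos (by exact_mod_cast hend)]
    · have hklt : k < occ.length := by omega
      have hdropeq : occ.drop k = occ[k] :: occ.drop (k + 1) := List.drop_eq_getElem_cons hklt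
      have hxocc : occ[k] ∈ occ := List.getElem_mem hklt
      obtain ⟨hx0, hx1⟩ := (pvOcc_mem_iff.mp hxocc).1
      have hA : posi.getD vn 0 = occ[k] := by rw [hk3, hdropeq]; rfl
      rw [if_neg (by rw [hA]; omega),
          if_neg (show ¬ ((k : Int) = ((occ.length : Nat) : Int)) from fun h => hend (by exact_mod_cast h))]
      -- B's 'smaller' is the snapshot of the k-th occurrence
      have hsm : PySem.List.pyGetD (occ.map (pvSnap ls vn)) ((k : Nat) : Int) []
          = pvSnap ls vn occ[k] := by
        rw [PySem.List.pyGetD_natCast, List.getD_eq_getElem?_getD, List.getElem?_map,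
            List.getElem?_eq_getElem hklt]
        rfl
      rw [hsm]
      have hany : ∀ i ∈ PySem.List.pyRange 0 ((vn : Nat) : Int) 1,
          (decide (PySem.List.pyGetD posi i 0 < posi.getD vn 0))
            = (decide (PySem.List.pyGetD seen i 0 < PySem.List.pyGetD (pvSnap ls vn occ[k]) i 0)) := by
        intro i hi
        obtain ⟨hi0, hi1⟩ := PySem.List.mem_pyRange_one.mp hi
        have hieq : i = ((i.toNat : Nat) : Int) := (Int.toNat_of_nonneg hi0).symm
        have hilt : i.toNat < 10 := by omega
        have hivn : i.toNat < vn := by omega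
        obtain ⟨ki, hki, hki2, hki3⟩ := hinv i.toNat hilt
        have hsnapget : PySem.List.pyGetD (pvSnap ls vn occ[k]) i 0 = pvCntLt ls i.toNat occ[k] := by
          rw [hieq, PySem.List.pyGetD_natCast]
          unfold pvSnap
          rw [List.getD_eq_getElem?_getD, List.getElem?_map, List.getElem?_range hivn]
          rfl
        rw [hA, hsnapget, hieq, PySem.List.pyGetD_natCast posi, PySem.List.pyGetD_natCast seen,
            hki, hki3]
        have hcmp := pvHeadLt (pvOcc_pairwise ls ((i.toNat : Nat) : Int)) (ls.length : Int) occ[k]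
          (fun x hx => pvOccElt_lt hx) (le_of_lt hx1) ki
        unfold pvCntLt
        simp only [decide_eq_decide]
        exact hcmp
      by_cases hb : (PySem.List.pyRange 0 ((vn : Nat) : Int) 1).any
          (fun i => decide (PySem.List.pyGetD posi i 0 < posi.getD vn 0))
      · rw [if_pos hb, if_pos (by rw [← pvAnyCongr hany]; exact hb)]
      · rw [if_neg hb, if_neg (by rw [← pvAnyCongr hany]; exact hb)]
        rw [hA, PySem.List.pySetD_natCast posi, PySem.List.pySetD_natCast seen]
        have hscan : pvScanA ls (ls.length : Int) c (occ[k] + 1)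
            = (occ.drop (k + 1)).headD (ls.length : Int) := by
          rw [pvScanSpec ls c (occ[k] + 1) (by omega) (by omega)]
          rw [show pvOcc ls (pvDv c) = occ by rw [hwv]]
          rw [pvFilterDrop (pvOcc_pairwise ls _) hklt]
        apply ih hrest
        · rw [List.length_set, hlenA]
        · rw [List.length_set, hlenS]
        · intro u hu
          by_cases huv : u = vn
          · subst huv
            refine ⟨k + 1, ?_, by rw [← hocc]; omega, ?_⟩
            · rw [List.getD_eq_getElem?_getD, List.getElem?_set_self (by omega)]
              simp
            · rw [List.getD_eq_getElem?_getD, List.getElem?_set_self (by omega)]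
              simpa using hscan
          · obtain ⟨ku, hku, hku2, hku3⟩ := hinv u hu
            refine ⟨ku, ?_, hku2, ?_⟩
            · rw [List.getD_eq_getElem?_getD, List.getElem?_set_ne (fun h => huv (by omega)),
                  ← List.getD_eq_getElem?_getD]
              exact hku
            · rw [List.getD_eq_getElem?_getD, List.getElem?_set_ne (fun h => huv (by omega)),
                  ← List.getD_eq_getElem?_getD]
              exact hku3

-- ===== VERDICT (by name: the statement is the Claim_ definition above) =====
theorem isTransformable_spec : Claim_equal_isTransformable := by
  intro s t _ hpre
  unfold Pre_isTransformable at hpre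
  simp only [Bool.and_eq_true, List.all_eq_true, Bool.and_eq_true, decide_eq_true_eq] at hpre
  unfold Spec_isTransformable isTransformable isTransformable_alt
  obtain ⟨-, hsnaps⟩ := pvFoldB_spec s.toList (fun c hc => hpre.1 c hc)
  refine pvLoopEq s.toList t.toList (fun c hc => hpre.2 c hc) _ _ _ (pvInitA_len _ _)
    (by simp) ?_ ?_
  · intro v hv
    simpa using hsnaps v hv
  · intro v hv
    refine ⟨0, ?_, by simp, ?_⟩
    · interval_cases v <;> rfl
    · simpa using pvInitA_spec s.toList (fun c hc => hpre.1 c hc) _ le_rfl v hv
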